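-- pv_equiv track=rewrite | github.com/dennismathewjose/Financial-ChatBot--BCG-Gen-AI-Forage- | crawler/chunk_formatter.py | basic_subchunk_split
-- ===== SOURCE A (Python) =====
-- def basic_subchunk_split(lines):
--     sub_chunks = []
--     current_sub = []
--     current_title = "General"
--     for line in lines:
--         if len(line.split()) < 15 and line.istitle():
--             if current_sub:
--                 sub_chunks.append((current_title, "\n".join(current_sub)))
--                 current_sub = []
--             current_title = line.strip()
--         else:
--             current_sub.append(line)
--     if current_sub:
--         sub_chunks.append((current_title, "\n".join(current_sub)))
--     return sub_chunks
-- ===== SOURCE B (Python) =====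
-- def basic_subchunk_split(lines):
--     def is_title(l):
--         return len(l.split()) < 15 and l.istitle()
--
--     def go(rest, title):
--         i = next((k for k, l in enumerate(rest) if is_title(l)), len(rest))
--         chunks = [(title, "\n".join(rest[:i]))] if i > 0 else []
--         if i == len(rest):
--             return chunks
--         return chunks + go(rest[i + 1:], rest[i].strip())
--
--     return go(lines, "General")
-- ===== Notes on version B (the rewrite author's own statement) =====
-- stated objective: alternative
-- what changed: B replaces A's single accumulator-and-flush loop by a recursive decomposition: find the index of the first title line, slice off the run of body lines before it as one chunk, and recurse on the suffix after the title.
import Mathlib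
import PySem

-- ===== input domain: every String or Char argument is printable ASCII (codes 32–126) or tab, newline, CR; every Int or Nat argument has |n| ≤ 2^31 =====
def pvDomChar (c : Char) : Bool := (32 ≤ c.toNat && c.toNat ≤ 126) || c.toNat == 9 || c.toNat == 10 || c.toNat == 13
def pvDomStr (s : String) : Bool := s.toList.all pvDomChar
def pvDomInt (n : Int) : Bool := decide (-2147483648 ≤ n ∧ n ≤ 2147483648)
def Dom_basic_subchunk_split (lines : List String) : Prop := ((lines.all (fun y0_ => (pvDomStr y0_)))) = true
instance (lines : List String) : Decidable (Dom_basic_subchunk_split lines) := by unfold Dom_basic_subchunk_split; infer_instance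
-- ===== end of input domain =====

-- B recurses on title boundaries (find first title, slice the body run, recurse on the suffix)
-- instead of A's accumulator-and-flush loop; same cost, different decomposition.

-- hand port of str.istitle (PySem has no istitle): CPython's scan with a
-- previous-char-is-cased flag; exact on the ASCII domain.
def pyIstitleGo : List Char → Bool → Bool → Bool
  | [], _, found => found
  | c :: cs, prev, found =>
    if PySem.Chars.isupper c then (if prev then false else pyIstitleGo cs true true)
    else if PySem.Chars.islower c then (if !prev then false else pyIstitleGo cs true true)
    else pyIstitleGo cs false found

def pyIstitle (s : String) : Bool := pyIstitleGo s.toList false false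

-- 'len(line.split()) < 15 and line.istitle()' (B's is_title helper; A writes it inline)
def isTitleLine (line : String) : Bool :=
  (PySem.Str.split₀ line).length < 15 && pyIstitle line

-- ===== PORT A =====
def aStep (st : List (String × String) × List String × String) (line : String) :
    List (String × String) × List String × String :=
  if (PySem.Str.split₀ line).length < 15 && pyIstitle line then
    (if st.2.1 ≠ [] then
      (st.1 ++ [(st.2.2, PySem.Str.join "\n" st.2.1)], [], PySem.Str.strip line)
     else (st.1, [], PySem.Str.strip line))
  else (st.1, st.2.1 ++ [line], st.2.2)

def basic_subchunk_split (lines : List String) : List (String × String) :=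
  let st := lines.foldl aStep ([], [], "General")
  if st.2.1 ≠ [] then st.1 ++ [(st.2.2, PySem.Str.join "\n" st.2.1)] else st.1

-- ===== PORT B =====
-- rest[:i] = take i, rest[i+1:] = drop (i+1), rest[i] = getD i (i < len): exact, indices nonneg
def altGo (rest : List String) (title : String) : List (String × String) :=
  let i := rest.findIdx isTitleLine
  let chunks := if 0 < i then [(title, PySem.Str.join "\n" (rest.take i))] else []
  if _h : i = rest.length then chunks
  else chunks ++ altGo (rest.drop (i + 1)) (PySem.Str.strip (rest.getD i ""))
termination_by rest.length
decreasing_by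
  simp only [List.length_drop]
  have := List.findIdx_le_length (p := isTitleLine) (xs := rest)
  omega

def basic_subchunk_split_alt (lines : List String) : List (String × String) :=
  altGo lines "General"

-- ===== PRECONDITION & SPEC =====
def Spec_basic_subchunk_split (lines : List String) (out : List (String × String)) : Prop := out = basic_subchunk_split_alt lines
instance (lines : List String) (out : List (String × String)) : Decidable (Spec_basic_subchunk_split lines out) := by unfold Spec_basic_subchunk_split; infer_instance

-- ===== CLAIM (what is proved, stated in full; the proofs are below) =====
def Claim_equal_basic_subchunk_split : Prop := ∀ (lines : List String), Dom_basic_subchunk_split lines → Spec_basic_subchunk_split lines (basic_subchunk_split lines)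

-- ===== LEMMAS AND PROOFS =====

-- the common recursive specification of A's loop
def specS : List String → String → List String → List (String × String)
  | [], title, cur => if cur ≠ [] then [(title, PySem.Str.join "\n" cur)] else []
  | l :: ls, title, cur =>
    if isTitleLine l then
      (if cur ≠ [] then [(title, PySem.Str.join "\n" cur)] else []) ++
        specS ls (PySem.Str.strip l) []
    else specS ls title (cur ++ [l])

-- A's final flush, as a function of the loop state
def flushA (st : List (String × String) × List String × String) : List (String × String) :=
  if st.2.1 ≠ [] then st.1 ++ [(st.2.2, PySem.Str.join "\n" st.2.1)] else st.1

-- one step of altGo with a pending accumulator prepended to the first run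
def altRun (lines : List String) (title : String) (cur : List String) : List (String × String) :=
  let i := lines.findIdx isTitleLine
  (if cur ++ lines.take i ≠ [] then [(title, PySem.Str.join "\n" (cur ++ lines.take i))] else []) ++
  (if i = lines.length then [] else
    altGo (lines.drop (i + 1)) (PySem.Str.strip (lines.getD i "")))

lemma flush_foldl_eq_specS (lines : List String) :
    ∀ (chunks : List (String × String)) (cur : List String) (title : String),
      flushA (lines.foldl aStep (chunks, cur, title)) = chunks ++ specS lines title cur := by
  induction lines with
  | nil =>
    intro chunks cur title
    simp only [List.foldl_nil, specS, flushA]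
    split <;> simp
  | cons l ls ih =>
    intro chunks cur title
    simp only [List.foldl_cons, specS]
    by_cases hT : isTitleLine l
    · have hT' : ((PySem.Str.split₀ l).length < 15 && pyIstitle l) = true := by
        simpa [isTitleLine] using hT
      by_cases hc : cur = []
      · have hstep : aStep (chunks, cur, title) l = (chunks, [], PySem.Str.strip l) := by
          simp [aStep, hT', hc]
        rw [hstep, ih, hT]
        simp [hc]
      · have hstep : aStep (chunks, cur, title) l
            = (chunks ++ [(title, PySem.Str.join "\n" cur)], [], PySem.Str.strip l) := by
          simp [aStep, hT', hc]
        rw [hstep, ih, hT]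
        simp [hc]
    · have hT' : ((PySem.Str.split₀ l).length < 15 && pyIstitle l) = false := by
        simpa [isTitleLine] using hT
      have hstep : aStep (chunks, cur, title) l = (chunks, cur ++ [l], title) := by
        simp [aStep, hT']
      rw [hstep, ih]
      simp [hT]

lemma altRun_nil_eq_altGo (lines : List String) (title : String) :
    altRun lines title [] = altGo lines title := by
  rw [altGo]
  simp only [altRun, List.nil_append]
  have hle := List.findIdx_le_length (p := isTitleLine) (xs := lines)
  have htake : (lines.take (lines.findIdx isTitleLine) ≠ []) ↔ 0 < lines.findIdx isTitleLine := by
    constructor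
    · intro h
      rcases Nat.eq_zero_or_pos (lines.findIdx isTitleLine) with h0 | h0
      · simp [h0] at h
      · exact h0
    · intro h
      have hne : lines ≠ [] := by
        intro he; subst he; simp at h
      simp [List.take_eq_nil_iff, Nat.pos_iff_ne_zero.mp h, hne]
  by_cases hend : lines.findIdx isTitleLine = lines.length
  · rw [dif_pos hend, if_pos hend, List.append_nil, if_congr htake rfl rfl]
  · rw [dif_neg hend, if_neg hend, if_congr htake rfl rfl]

lemma specS_eq_altRun (n : Nat) :
    ∀ (lines : List String), lines.length ≤ n → ∀ (title : String) (cur : List String),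
      specS lines title cur = altRun lines title cur := by
  induction n with
  | zero =>
    intro lines hlen title cur
    have h0 : lines = [] := List.length_eq_zero_iff.mp (Nat.le_zero.mp hlen)
    subst h0
    simp only [specS, altRun, List.findIdx_nil, List.take_nil, List.append_nil,
      List.length_nil, List.drop_nil]
    split <;> simp
  | succ n ih =>
    intro lines hlen title cur
    cases lines with
    | nil =>
      simp only [specS, altRun, List.findIdx_nil, List.take_nil, List.append_nil,
        List.length_nil, List.drop_nil]
      split <;> simp
    | cons l ls =>
      have hls : ls.length ≤ n := by simpa using Nat.succ_le_succ_iff.mp hlen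
      by_cases hT : isTitleLine l
      · have hfi : (l :: ls).findIdx isTitleLine = 0 := by
          simp [List.findIdx_cons, hT]
        have hne : (0 : Nat) ≠ (l :: ls).length := by simp
        simp only [specS, hT, if_true, altRun, hfi, List.take_zero, List.append_nil,
          if_neg hne, List.drop_succ_cons, List.drop_zero, List.getD_cons_zero]
        congr 1
        rw [ih ls hls (PySem.Str.strip l) []]
        exact altRun_nil_eq_altGo ls (PySem.Str.strip l)
      · have hfi : (l :: ls).findIdx isTitleLine = ls.findIdx isTitleLine + 1 := by
          simp [List.findIdx_cons, hT]
        simp only [specS, hT, if_false, Bool.false_eq_true]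
        rw [ih ls hls title (cur ++ [l])]
        simp only [altRun, hfi, List.length_cons, Nat.add_right_cancel_iff,
          List.drop_succ_cons, List.getD_cons_succ, List.take_succ_cons,
          List.append_assoc, List.singleton_append]

-- ===== VERDICT (by name: the statement is the Claim_ definition above) =====
theorem basic_subchunk_split_spec : Claim_equal_basic_subchunk_split := by
  intro lines _
  show basic_subchunk_split lines = basic_subchunk_split_alt lines
  have h1 := flush_foldl_eq_specS lines [] [] "General"
  have h2 := specS_eq_altRun lines.length lines (Nat.le_refl _) "General" []
  have hb : basic_subchunk_split lines = flushA (lines.foldl aStep ([], [], "General")) := rfl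
  rw [hb, h1, h2, altRun_nil_eq_altGo]
  rfl
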